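-- pv_equiv track=rewrite | github.com/ikheetbas/Verhalen | rm/files.py | get_field_positions
-- ===== SOURCE A (Python) =====
-- from typing import Tuple, Dict
--
-- def get_field_positions(available_headers: Tuple[str],
--                         defined_headers: Dict[str, int]) \
--         -> Dict[str, int]:
--     """
--     Returns the positions, as defined in the defined_headers, of the available headers
--     as found in the file. First position has index: 0
--     """
--     field_positions = dict()
--
--     for fieldname in defined_headers:
--         defined_header = defined_headers[fieldname]
--         if defined_header in available_headers:
--             position = available_headers.index(defined_header)
--             field_positions[fieldname] = position
--
--     return field_positions
-- ===== SOURCE B (Python) =====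
-- def get_field_positions(available_headers, defined_headers):
--     # Inverted index: header value -> every fieldname that defines it.
--     fields_for = {}
--     for fieldname, header in defined_headers.items():
--         fields_for.setdefault(header, []).append(fieldname)
--     # One pass over the file's headers; the first occurrence claims each fieldname.
--     found = {}
--     for index, header in enumerate(available_headers):
--         for fieldname in fields_for.get(header, ()):
--             if fieldname not in found:
--                 found[fieldname] = index
--     # Emit in field-definition order.
--     return {fieldname: found[fieldname]
--             for fieldname in defined_headers if fieldname in found}
-- ===== Notes on version B (the rewrite author's own statement) =====
-- stated objective: faster
-- what changed: Inverts the loop structure: instead of scanning available_headers once per field (membership test + .index), B builds an inverted index header->fieldnames from defined_headers and makes a single enumerate pass over available_headers, assigning each fieldname its first-seen position, then emits in field-definition order.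
import Mathlib
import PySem

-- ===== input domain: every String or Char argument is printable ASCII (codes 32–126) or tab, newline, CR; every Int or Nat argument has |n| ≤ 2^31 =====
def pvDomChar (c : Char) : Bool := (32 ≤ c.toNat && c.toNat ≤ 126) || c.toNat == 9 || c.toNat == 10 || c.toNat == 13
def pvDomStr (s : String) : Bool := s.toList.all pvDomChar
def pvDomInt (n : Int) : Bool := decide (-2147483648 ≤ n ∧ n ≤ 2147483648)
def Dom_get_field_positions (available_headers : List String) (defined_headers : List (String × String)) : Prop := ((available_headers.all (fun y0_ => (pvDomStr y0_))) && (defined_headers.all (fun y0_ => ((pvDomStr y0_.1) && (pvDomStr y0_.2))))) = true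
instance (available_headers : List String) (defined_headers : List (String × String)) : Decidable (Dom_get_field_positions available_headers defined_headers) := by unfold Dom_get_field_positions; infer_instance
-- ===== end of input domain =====

-- B inverts the loop structure: an inverted index header->fieldnames plus one enumerate
-- pass over available_headers replaces A's per-field membership test and .index scan (faster).

-- ===== PORT A =====
def get_field_positions (available_headers : List String) (defined_headers : List (String × String)) : List (String × Int) :=
  -- field_positions = dict(); for fieldname in defined_headers: defined_header = defined_headers[fieldname]; …
  ((PySem.Dict.ofList defined_headers).items.foldl (fun (fp : PySem.Dict String Int) p =>
      match (PySem.Dict.ofList defined_headers).get? p.1 with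
      | some defined_header =>
          if defined_header ∈ available_headers then
            match PySem.List.index? available_headers defined_header with
            | some position => fp.insert p.1 (position : Int)
            | none => fp
          else fp
      | none => fp) PySem.Dict.empty).items

-- ===== PORT B =====
-- fields_for = {}; for fieldname, header in defined_headers.items():
--   fields_for.setdefault(header, []).append(fieldname)        -- exact: d[k] = d.get(k, []) + [f] = Dict.modify
-- found = {}; for index, header in enumerate(available_headers):
--   for fieldname in fields_for.get(header, ()): if fieldname not in found: found[fieldname] = index
-- return {fieldname: found[fieldname] for fieldname in defined_headers if fieldname in found}
def get_field_positions_alt (available_headers : List String) (defined_headers : List (String × String)) : List (String × Int) :=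
  ((PySem.Dict.ofList defined_headers).items.foldl (fun (fp : PySem.Dict String Int) p =>
      match ((PySem.List.enumerate available_headers).foldl
          (fun (fd : PySem.Dict String Int) q =>
            ((((PySem.Dict.ofList defined_headers).items.foldl
                (fun (m : PySem.Dict String (List String)) r =>
                  m.modify r.2 [] (· ++ [r.1])) PySem.Dict.empty)).getD q.2 []).foldl
              (fun (fd : PySem.Dict String Int) f =>
                if fd.contains f then fd else fd.insert f q.1) fd)
          PySem.Dict.empty).get? p.1 with
      | some i => fp.insert p.1 i
      | none => fp) PySem.Dict.empty).items

-- ===== PRECONDITION & SPEC =====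
def Spec_get_field_positions (available_headers : List String) (defined_headers : List (String × String)) (out : List (String × Int)) : Prop := out = get_field_positions_alt available_headers defined_headers
instance (available_headers : List String) (defined_headers : List (String × String)) (out : List (String × Int)) : Decidable (Spec_get_field_positions available_headers defined_headers out) := by unfold Spec_get_field_positions; infer_instance

-- ===== CLAIM (what is proved, stated in full; the proofs are below) =====
def Claim_equal_get_field_positions : Prop := ∀ (available_headers : List String) (defined_headers : List (String × String)), Dom_get_field_positions available_headers defined_headers → Spec_get_field_positions available_headers defined_headers (get_field_positions available_headers defined_headers)

-- ===== LEMMAS AND PROOFS =====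

-- Prepending a non-matching header shifts the first-occurrence positions by one.
theorem index?_shift (x h : String) (xs : List String) (s : Int) (hne : x ≠ h) :
    Option.map (fun (n : Nat) => s + 1 + (n : Int)) (PySem.List.index? xs h) =
      Option.map (fun (n : Nat) => s + (n : Int)) (PySem.List.index? (x :: xs) h) := by
  rw [PySem.List.index?_cons_of_ne xs hne, Option.map_map]
  cases PySem.List.index? xs h with
  | none => rfl
  | some k =>
      simp only [Option.map_some, Function.comp]
      congr 1
      push_cast
      ring

-- The inner first-assignment loop: lookups afterwards.
theorem inner_get? (L : List String) (s : Int) (fd : PySem.Dict String Int) (f : String) :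
    (L.foldl (fun (fd : PySem.Dict String Int) g =>
        if fd.contains g then fd else fd.insert g s) fd).get? f =
      if fd.contains f then fd.get? f else if f ∈ L then some s else none := by
  induction L generalizing fd with
  | nil =>
      by_cases hc : fd.contains f
      · simp [hc]
      · rw [Bool.not_eq_true] at hc
        simp [hc, (PySem.Dict.get?_eq_none_iff_contains fd f).mpr hc]
  | cons g L ih =>
      rw [List.foldl_cons]
      by_cases hc : fd.contains g
      · simp only [hc, if_true, ih]
        by_cases hcf : fd.contains f
        · simp [hcf]
        · have hfg : f ≠ g := fun e => hcf (e ▸ hc)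
          rw [Bool.not_eq_true] at hcf
          simp [hcf, List.mem_cons, hfg]
      · rw [Bool.not_eq_true] at hc
        simp only [hc, Bool.false_eq_true, if_false, ih]
        by_cases hfg : f = g
        · subst hfg
          simp [PySem.Dict.contains_insert_self fd f s, PySem.Dict.get?_insert_self, hc]
        · rw [PySem.Dict.contains_insert, PySem.Dict.get?_insert_of_ne fd s hfg]
          have hbx : (f == g) = false := by simp [hfg]
          rw [hbx, Bool.false_or]
          by_cases hcf : fd.contains f
          · simp [hcf]
          · rw [Bool.not_eq_true] at hcf
            simp [hcf, List.mem_cons, hfg]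

-- `contains` version of the previous lemma.
theorem inner_contains (L : List String) (s : Int) (fd : PySem.Dict String Int) (f : String) :
    (L.foldl (fun (fd : PySem.Dict String Int) g =>
        if fd.contains g then fd else fd.insert g s) fd).contains f =
      (fd.contains f || decide (f ∈ L)) := by
  rw [PySem.Dict.contains_eq_isSome_get?, inner_get? L s fd f]
  by_cases hc : fd.contains f
  · rw [if_pos hc, ← PySem.Dict.contains_eq_isSome_get?, hc, Bool.true_or]
  · rw [Bool.not_eq_true] at hc
    rw [if_neg (by simp [hc]), hc, Bool.false_or]
    by_cases hm : f ∈ L <;> simp [hm]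

-- The enumerate pass: each fieldname ends up at the first position of its header.
theorem found_get? (dd : PySem.Dict String String) (fieldsFor : PySem.Dict String (List String))
    (hL : ∀ f x, f ∈ fieldsFor.getD x [] ↔ dd.get? f = some x)
    (avail : List String) (s : Int) (fd : PySem.Dict String Int) (f : String) :
    ((PySem.List.enumerate avail s).foldl
        (fun fd q => (fieldsFor.getD q.2 []).foldl
            (fun (fd : PySem.Dict String Int) g =>
              if fd.contains g then fd else fd.insert g q.1) fd) fd).get? f =
      if fd.contains f then fd.get? f
      else match dd.get? f with
        | some h => (PySem.List.index? avail h).map (fun (n : Nat) => s + (n : Int))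
        | none => none := by
  induction avail generalizing s fd with
  | nil =>
      simp only [PySem.List.enumerate_nil, List.foldl_nil]
      by_cases hc : fd.contains f
      · rw [if_pos hc]
      · rw [Bool.not_eq_true] at hc
        rw [if_neg (by simp [hc]), (PySem.Dict.get?_eq_none_iff_contains fd f).mpr hc]
        cases dd.get? f with
        | none => rfl
        | some h => simp
  | cons x xs ih =>
      rw [PySem.List.enumerate_cons, List.foldl_cons, ih, inner_contains]
      by_cases hc : fd.contains f
      · rw [hc, Bool.true_or, if_pos rfl, if_pos rfl, inner_get?, if_pos hc]
      · rw [Bool.not_eq_true] at hc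
        rw [hc, Bool.false_or]
        simp only [Bool.false_eq_true, if_false]
        by_cases hm : f ∈ fieldsFor.getD x []
        · have hdd : dd.get? f = some x := (hL f x).mp hm
          rw [if_pos (by simp [hm]), inner_get?, hc]
          simp only [Bool.false_eq_true, if_false]
          rw [if_pos (show f ∈ fieldsFor.getD (s, x).2 [] from hm), hdd]
          show some s = Option.map (fun (n : Nat) => s + (n : Int)) (PySem.List.index? (x :: xs) x)
          rw [PySem.List.index?_cons_self, Option.map_some]
          simp
        · rw [if_neg (by simp [hm])]
          cases hdd : dd.get? f with
          | none => rfl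
          | some h =>
              have hne : x ≠ h := fun e => hm ((hL f x).mpr (e ▸ hdd))
              exact index?_shift x h xs s hne
-- The grouping pass: fields_for maps a header to exactly the fieldnames defined to it.
theorem fieldsFor_mem (dd : PySem.Dict String String) (hnd : dd.keys.Nodup) (f x : String) :
    f ∈ (dd.items.foldl (fun (m : PySem.Dict String (List String)) r =>
          m.modify r.2 [] (· ++ [r.1])) PySem.Dict.empty).getD x [] ↔
      dd.get? f = some x := by
  have hmap : dd.items.foldl (fun (m : PySem.Dict String (List String)) r =>
        m.modify r.2 [] (· ++ [r.1])) PySem.Dict.empty =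
      (dd.items.map Prod.swap).foldl
        (fun (m : PySem.Dict String (List String)) q =>
          m.modify q.1 [] (· ++ [q.2])) PySem.Dict.empty := by
    rw [List.foldl_map]
    rfl
  rw [hmap, PySem.Dict.getD_foldl_modify_append, PySem.Dict.getD_empty, List.nil_append,
      PySem.Dict.get?_eq_some_iff_mem_items dd f x hnd]
  constructor
  · intro hmem
    obtain ⟨q, hq, hq2⟩ := List.mem_map.mp hmem
    obtain ⟨hq1, hqx⟩ := List.mem_filter.mp hq
    obtain ⟨p, hp, hps⟩ := List.mem_map.mp hq1
    subst hps
    simp only [Prod.fst_swap, Prod.snd_swap] at hq2 hqx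
    have hqx' : p.2 = x := by simpa using hqx
    have hpe : p = (f, x) := Prod.ext hq2 hqx'
    exact hpe ▸ hp
  · intro hmem
    exact List.mem_map.mpr ⟨(x, f), List.mem_filter.mpr
      ⟨List.mem_map.mpr ⟨(f, x), hmem, rfl⟩, by simp⟩, rfl⟩

-- ===== VERDICT (by name: the statement is the Claim_ definition above) =====
theorem get_field_positions_spec : Claim_equal_get_field_positions := by
  intro avail defined _
  unfold Spec_get_field_positions get_field_positions get_field_positions_alt
  congr 1
  apply PySem.List.foldl_congr_mem
  intro fp p hp
  have hnd : (PySem.Dict.ofList defined).keys.Nodup := PySem.Dict.nodup_keys_ofList defined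
  have hq : (PySem.Dict.ofList defined).get? p.1 = some p.2 :=
    PySem.Dict.get?_of_mem_items (PySem.Dict.ofList defined) hp hnd
  rw [found_get? (PySem.Dict.ofList defined) _
        (fieldsFor_mem (PySem.Dict.ofList defined) hnd) avail 0 PySem.Dict.empty p.1, hq]
  simp only [PySem.Dict.contains_empty, Bool.false_eq_true, if_false]
  by_cases hm : p.2 ∈ avail
  · obtain ⟨k, hk⟩ := Option.isSome_iff_exists.mp
      ((PySem.List.index?_isSome_iff avail p.2).mpr hm)
    rw [if_pos hm, hk, Option.map_some]
    show fp.insert p.1 (k : Int) = fp.insert p.1 ((0 : Int) + (k : Int))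
    simp
  · rw [if_neg hm, (PySem.List.index?_eq_none_iff avail p.2).mpr hm, Option.map_none]
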